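-- pv_equiv track=rewrite | github.com/DrWeeny/dw_coding | dw_maya/dw_paint/utils/conversion.py | indices_to_range_str
-- ===== SOURCE A (Python) =====
-- from typing import List, Dict, Union, Optional, Any, Tuple
--
-- def indices_to_range_str(indices: List[int]) -> str:
--     """Convert list of indices to Maya range notation.
--
--     Args:
--         indices: List of indices
--
--     Returns:
--         Maya range string
--     """
--     if not indices:
--         return ""
--
--     ranges = []
--     start = indices[0]
--     prev = start
--
--     for i in indices[1:] + [None]:
--         if i != prev + 1:
--             if start == prev:
--                 ranges.append(str(start))
--             else:
--                 ranges.append(f"{start}:{prev}")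
--             start = i
--         prev = i
--
--     return ','.join(ranges)
-- ===== SOURCE B (Python) =====
-- def indices_to_range_str(indices):
--     """Convert list of indices to Maya range notation (boundary-filter formulation)."""
--     n = len(indices)
--     starts = [x for j, x in enumerate(indices) if j == 0 or x != indices[j - 1] + 1]
--     ends = [x for j, x in enumerate(indices) if j == n - 1 or indices[j + 1] != x + 1]
--     return ','.join(str(s) if s == e else f"{s}:{e}" for s, e in zip(starts, ends))
-- ===== Notes on version B (the rewrite author's own statement) =====
-- stated objective: alternative
-- what changed: B computes run boundaries with two independent neighbor-comparison filter passes over enumerate (starts where x != indices[j-1]+1, ends where indices[j+1] != x+1) and zips them, instead of A's stateful single loop carrying (ranges, start, prev) with a None sentinel.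
import Mathlib
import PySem

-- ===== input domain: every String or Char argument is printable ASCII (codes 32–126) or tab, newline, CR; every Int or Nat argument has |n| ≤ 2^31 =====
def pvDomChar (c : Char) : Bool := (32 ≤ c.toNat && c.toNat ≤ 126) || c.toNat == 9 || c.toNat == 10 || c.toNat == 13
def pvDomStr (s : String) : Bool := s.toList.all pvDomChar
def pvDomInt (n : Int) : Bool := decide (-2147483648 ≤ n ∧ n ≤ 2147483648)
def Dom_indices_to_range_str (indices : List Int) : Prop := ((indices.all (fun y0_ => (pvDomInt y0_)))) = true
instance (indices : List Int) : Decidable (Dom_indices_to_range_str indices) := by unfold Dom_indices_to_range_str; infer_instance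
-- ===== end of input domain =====

-- B replaces A's stateful None-sentinel loop by two independent boundary-filter passes
-- (run starts where x ≠ prev+1, run ends where next ≠ x+1) zipped together; objective: alternative.


-- ===== PORT A =====
-- str(x) / f-string rendering of a value that is either an int or None
def pvOptStr (o : Option Int) : String :=
  match o with
  | some n => PySem.Int.toStr n
  | none => "None"

-- the loop `for i in indices[1:] + [None]: …` over state (ranges, start, prev);
-- start/prev are Option Int because Python assigns the None sentinel into them
def pvALoop : List (Option Int) → List String → Option Int → Option Int → List String
  | [], ranges, _, _ => ranges
  | i :: rest, ranges, start, prev =>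
    if i ≠ prev.map (· + 1) then
      let ranges := ranges ++ [if start = prev then pvOptStr start else pvOptStr start ++ ":" ++ pvOptStr prev]
      pvALoop rest ranges i i
    else
      pvALoop rest ranges start i

def indices_to_range_str (indices : List Int) : String :=
  match indices with
  | [] => ""
  | i0 :: rest =>
    String.intercalate "," (pvALoop (rest.map some ++ [none]) [] (some i0) (some i0))

-- ===== PORT B =====
-- comprehension filter `j == 0 or x != indices[j-1] + 1`; Python's `or` short-circuits,
-- so indices[j-1] is only read for j ≥ 1 where it is in range — the Option form below
-- yields the same condition value there, and the j = 0 disjunct decides the rest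
def pvStartCond (l : List Int) : Int × Int → Option Int :=
  fun jx => if jx.1 = 0 ∨ some jx.2 ≠ (PySem.List.pyGet? l (jx.1 - 1)).map (· + 1) then some jx.2 else none

-- comprehension filter `j == n - 1 or indices[j+1] != x + 1` (same short-circuit remark)
def pvEndCond (l : List Int) : Int × Int → Option Int :=
  fun jx => if jx.1 = PySem.List.len l - 1 ∨ PySem.List.pyGet? l (jx.1 + 1) ≠ some (jx.2 + 1) then some jx.2 else none

-- `starts = [x for j, x in enumerate(indices) if …]`
def pvStarts (l : List Int) : List Int :=
  (PySem.List.enumerate l).filterMap (pvStartCond l)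

-- `ends = [x for j, x in enumerate(indices) if …]`
def pvEnds (l : List Int) : List Int :=
  (PySem.List.enumerate l).filterMap (pvEndCond l)

-- `str(s) if s == e else f"{s}:{e}"`
def pvFmt (r : Int × Int) : String :=
  if r.1 = r.2 then PySem.Int.toStr r.1 else PySem.Int.toStr r.1 ++ ":" ++ PySem.Int.toStr r.2

def indices_to_range_str_alt (indices : List Int) : String :=
  String.intercalate "," (((pvStarts indices).zip (pvEnds indices)).map pvFmt)

-- ===== PRECONDITION & SPEC =====
def Spec_indices_to_range_str (indices : List Int) (out : String) : Prop := out = indices_to_range_str_alt indices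
instance (indices : List Int) (out : String) : Decidable (Spec_indices_to_range_str indices out) := by unfold Spec_indices_to_range_str; infer_instance

-- ===== CLAIM (what is proved, stated in full; the proofs are below) =====
def Claim_equal_indices_to_range_str : Prop := ∀ (indices : List Int), Dom_indices_to_range_str indices → Spec_indices_to_range_str indices (indices_to_range_str indices)

-- ===== LEMMAS AND PROOFS =====
-- common reference shape: the list of consecutive runs as (start, end) pairs
def pvRuns : List Int → List (Int × Int) → Int → Int → List (Int × Int)
  | [], runs, s, e => runs ++ [(s, e)]
  | x :: rest, runs, s, e =>
    if x = e + 1 then pvRuns rest runs s x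
    else pvRuns rest (runs ++ [(s, e)]) x x

-- run starts after a previous element p (head handled separately)
def pvSAux : Int → List Int → List Int
  | _, [] => []
  | p, x :: xs => (if x = p + 1 then [] else [x]) ++ pvSAux x xs

-- run ends from current previous element p
def pvEAux : Int → List Int → List Int
  | p, [] => [p]
  | p, x :: xs => (if x = p + 1 then [] else [p]) ++ pvEAux x xs

theorem pvRuns_acc (l : List Int) (runs : List (Int × Int)) (s e : Int) :
    pvRuns l runs s e = runs ++ pvRuns l [] s e := by
  induction l generalizing runs s e with
  | nil => simp [pvRuns]
  | cons x rest ih =>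
    simp only [pvRuns]
    split_ifs with h
    · exact ih runs s x
    · rw [ih (runs ++ [(s, e)]), ih ([] ++ [(s, e)])]; simp

theorem pvALoop_eq (l : List Int) (ranges : List String) (s p : Int) :
    pvALoop (l.map some ++ [none]) ranges (some s) (some p)
      = ranges ++ (pvRuns l [] s p).map pvFmt := by
  induction l generalizing ranges s p with
  | nil =>
    simp [pvALoop, pvRuns, pvFmt, pvOptStr]
  | cons x rest ih =>
    simp only [List.map_cons, List.cons_append, pvALoop, Option.map_some]
    by_cases h : x = p + 1
    · subst h
      rw [if_neg (by simp)]
      have hr : pvRuns ((p + 1) :: rest) [] s p = pvRuns rest [] s (p + 1) := by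
        simp [pvRuns]
      rw [hr]
      exact ih ranges s (p + 1)
    · have hne : (some x ≠ some (p + 1)) := by simpa using h
      rw [if_pos hne]
      simp only [pvRuns, if_neg h]
      rw [ih, pvRuns_acc rest ([] ++ [(s, p)]) x x]
      by_cases h2 : s = p <;> simp [h2, pvFmt, pvOptStr]

theorem pvStarts_aux (xs : List Int) : ∀ (pre : List Int) (y : Int),
    (PySem.List.enumerate xs (((pre ++ [y]).length : Nat) : Int)).filterMap (pvStartCond (pre ++ [y] ++ xs))
      = pvSAux y xs := by
  induction xs with
  | nil => intro pre y; simp [PySem.List.enumerate_nil, pvSAux]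
  | cons x rest ih =>
    intro pre y
    rw [PySem.List.enumerate_cons, List.filterMap_cons]
    have hidx : ((((pre ++ [y]).length : Nat) : Int) - 1) = ((pre.length : Nat) : Int) := by
      simp
    have hget : PySem.List.pyGet? (pre ++ [y] ++ (x :: rest)) (((pre.length : Nat) : Int)) = some y := by
      have hL' : pre ++ [y] ++ (x :: rest) = pre ++ y :: (x :: rest) := by simp
      rw [hL']
      exact PySem.List.pyGet?_append_length pre (x :: rest) y
    have hcond : pvStartCond (pre ++ [y] ++ (x :: rest)) ((((pre ++ [y]).length : Nat) : Int), x)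
        = if x = y + 1 then none else some x := by
      by_cases h : x = y + 1
      · simp [pvStartCond, h]; omega
      · simp [pvStartCond, h]
    have hstep : (((pre ++ [y]).length : Nat) : Int) + 1 = (((pre ++ [y] ++ [x]).length : Nat) : Int) := by
      simp [List.length_append]; omega
    have hL : pre ++ [y] ++ (x :: rest) = (pre ++ [y]) ++ [x] ++ rest := by simp
    rw [hcond, hstep, hL, ih (pre ++ [y]) x]
    by_cases h : x = y + 1 <;> simp [pvSAux, h]

theorem pvEnds_aux (xs : List Int) : ∀ (pre : List Int) (p : Int),
    (PySem.List.enumerate (p :: xs) ((pre.length : Nat) : Int)).filterMap (pvEndCond (pre ++ p :: xs))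
      = pvEAux p xs := by
  induction xs with
  | nil =>
    intro pre p
    rw [PySem.List.enumerate_cons, PySem.List.enumerate_nil, List.filterMap_cons, List.filterMap_nil]
    have : pvEndCond (pre ++ [p]) (((pre.length : Nat) : Int), p) = some p := by
      simp only [pvEndCond]
      rw [if_pos]
      left
      simp [PySem.List.len]
    simp [this, pvEAux]
  | cons x rest ih =>
    intro pre p
    rw [PySem.List.enumerate_cons, List.filterMap_cons]
    have hget : PySem.List.pyGet? (pre ++ p :: x :: rest) (((pre.length : Nat) : Int) + 1)
        = some x := by
      have h1 : (((pre.length : Nat) : Int) + 1) = (((pre.length + 1 : Nat)) : Int) := by push_cast; ring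
      rw [h1, PySem.List.pyGet?_natCast]
      rw [List.getElem?_append_right (by omega)]
      simp
    have hcond : pvEndCond (pre ++ p :: x :: rest) (((pre.length : Nat) : Int), p)
        = if x = p + 1 then none else some p := by
      simp only [pvEndCond, hget]
      by_cases h : x = p + 1
      · simp [h, PySem.List.len]; omega
      · simp [h, PySem.List.len]
    have hstep : (((pre.length : Nat)) : Int) + 1 = ((((pre ++ [p]).length : Nat)) : Int) := by simp
    have hL : pre ++ p :: x :: rest = (pre ++ [p]) ++ x :: rest := by simp
    rw [hcond, hstep, hL, ih (pre ++ [p]) x]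
    by_cases h : x = p + 1 <;> simp [pvEAux, h]

theorem pvStarts_eq (i0 : Int) (rest : List Int) :
    pvStarts (i0 :: rest) = i0 :: pvSAux i0 rest := by
  unfold pvStarts
  rw [PySem.List.enumerate_cons, List.filterMap_cons]
  have hcond : pvStartCond (i0 :: rest) (0, i0) = some i0 := by
    simp [pvStartCond]
  rw [hcond]
  have h := pvStarts_aux rest [] i0
  simp only [List.nil_append] at h ⊢
  simpa using h

theorem pvEnds_eq (i0 : Int) (rest : List Int) :
    pvEnds (i0 :: rest) = pvEAux i0 rest := by
  unfold pvEnds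
  simpa using pvEnds_aux rest [] i0

theorem pvZip_runs (l : List Int) : ∀ (s p : Int),
    (s :: pvSAux p l).zip (pvEAux p l) = pvRuns l [] s p := by
  induction l with
  | nil => intro s p; simp [pvSAux, pvEAux, pvRuns]
  | cons x xs ih =>
    intro s p
    by_cases h : x = p + 1
    · simp only [pvSAux, pvEAux, pvRuns, if_pos h, List.nil_append]
      exact ih s x
    · simp only [pvSAux, pvEAux, pvRuns, if_neg h, List.singleton_append, List.zip_cons_cons]
      rw [ih x x, pvRuns_acc xs ([] ++ [(s, p)]) x x]
      simp

-- ===== VERDICT (by name: the statement is the Claim_ definition above) =====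
theorem indices_to_range_str_spec : Claim_equal_indices_to_range_str := by
  intro indices _
  unfold Spec_indices_to_range_str
  cases indices with
  | nil => rfl
  | cons i0 rest =>
    have hA : indices_to_range_str (i0 :: rest)
        = String.intercalate "," (pvALoop (rest.map some ++ [none]) [] (some i0) (some i0)) := rfl
    rw [hA, pvALoop_eq, List.nil_append]
    unfold indices_to_range_str_alt
    rw [pvStarts_eq, pvEnds_eq, pvZip_runs]
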